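-- pv_equiv track=rewrite | github.com/BashCtl/python-edabit | hard/ice_cream_sandwich.py | is_icecream_sandwich
-- ===== SOURCE A (Python) =====
-- def is_icecream_sandwich(s):
--     n = len(s)
--     if n < 3:
--         return False
--
--     left_char = s[0]
--     left_length = 0
--     while left_length < n and s[left_length] == left_char:
--         left_length += 1
--
--     right_char = s[-1]
--     right_length = 0
--     while right_length < n and s[-(right_length + 1)] == right_char:
--         right_length += 1
--
--     if left_length != right_length or left_char != right_char:
--         return False
--
--     middle = s[left_length:n - right_length]
--     if not middle or middle == left_char or len(set(middle)) > 1: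
--         return False
--
--     return True
-- ===== SOURCE B (Python) =====
-- def is_icecream_sandwich(s):
--     # Single forward pass: run-length encode s, then check for exactly
--     # three runs with matching first/last character and length.
--     groups = []
--     cur = None
--     count = 0
--     for ch in s:
--         if ch == cur:
--             count += 1
--         else:
--             if cur is not None:
--                 groups.append((cur, count))
--             cur, count = ch, 1
--     if cur is not None:
--         groups.append((cur, count))
--     return len(groups) == 3 and groups[0][0] == groups[2][0] and groups[0][1] == groups[2][1]
-- ===== Notes on version B (the rewrite author's own statement) =====
-- stated objective: simpler
-- what changed: Replaces A's two end-scans plus middle slice and set test with one forward run-length-encoding pass checked for exactly three runs with equal first/last char and length.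
import Mathlib
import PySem

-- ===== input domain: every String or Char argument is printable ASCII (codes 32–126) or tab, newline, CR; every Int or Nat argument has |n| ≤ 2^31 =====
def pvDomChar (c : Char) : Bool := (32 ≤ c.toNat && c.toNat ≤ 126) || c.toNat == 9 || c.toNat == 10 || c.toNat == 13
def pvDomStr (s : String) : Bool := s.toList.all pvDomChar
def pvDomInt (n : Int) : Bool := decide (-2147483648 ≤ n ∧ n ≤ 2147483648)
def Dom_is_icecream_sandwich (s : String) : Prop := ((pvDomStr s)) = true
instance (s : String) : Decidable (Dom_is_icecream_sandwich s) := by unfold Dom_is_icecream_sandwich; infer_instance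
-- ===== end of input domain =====

-- B replaces A's two end-scans + middle slice + distinct-count test by one forward
-- run-length-encoding pass checked for exactly three runs with equal first/last char
-- and length (objective: simpler).

-- ===== PORT A =====
-- A's two while loops: length of the maximal prefix run of character c
def pvRunLen (c : Char) : List Char → Nat
  | [] => 0
  | x :: xs => if x = c then pvRunLen c xs + 1 else 0

-- A's code after reading left_char/right_char
def pvAfterHeads (l : List Char) (n : Nat) (lc rc : Char) : Bool :=
  let leftLen := pvRunLen lc l                    -- first while loop (scan from the left)
  let rightLen := pvRunLen rc l.reverse           -- second while loop (s[-(k+1)] = l.reverse[k])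
  if leftLen ≠ rightLen ∨ lc ≠ rc then false
  else
    let middle := PySem.List.slice l (some (leftLen : Int)) (some ((n : Int) - (rightLen : Int)))
    if middle = [] ∨ middle = [lc] ∨ 1 < (PySem.Set.ofList middle).length then false
    else true

def is_icecream_sandwich (s : String) : Bool :=
  let l := s.toList
  let n := l.length
  if n < 3 then false
  else
    match PySem.List.pyGet? l 0, PySem.List.pyGet? l (-1) with   -- s[0], s[-1] (in range: n ≥ 3)
    | some lc, some rc => pvAfterHeads l n lc rc
    | _, _ => false

-- ===== PORT B =====
-- Source B's loop state: current run (c, k) plus remaining characters; emits groups in order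
def pvRleGo (c : Char) (k : Nat) : List Char → List (Char × Nat)
  | [] => [(c, k)]
  | x :: xs => if x = c then pvRleGo c (k + 1) xs else (c, k) :: pvRleGo x 1 xs

-- Source B's final line: exactly three groups, first/third char and count equal
def pvCheck (groups : List (Char × Nat)) : Bool :=
  match groups with
  | [(a, i), _, (b, j)] => a == b && i == j
  | _ => false

def is_icecream_sandwich_alt (s : String) : Bool :=
  match s.toList with
  | [] => false                                       -- no groups
  | c :: cs => pvCheck (pvRleGo c 1 cs)

-- ===== PRECONDITION & SPEC =====
def Spec_is_icecream_sandwich (s : String) (out : Bool) : Prop := out = is_icecream_sandwich_alt s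
instance (s : String) (out : Bool) : Decidable (Spec_is_icecream_sandwich s out) := by unfold Spec_is_icecream_sandwich; infer_instance

-- ===== CLAIM (what is proved, stated in full; the proofs are below) =====
def Claim_equal_is_icecream_sandwich : Prop := ∀ (s : String), Dom_is_icecream_sandwich s → Spec_is_icecream_sandwich s (is_icecream_sandwich s)

-- ===== LEMMAS AND PROOFS =====

-- the common characterisation: l is x^a ++ y^b ++ x^a with a,b ≥ 1 and y ≠ x
def pvSandwich (l : List Char) : Prop :=
  ∃ (x y : Char) (a b : Nat), 1 ≤ a ∧ 1 ≤ b ∧ y ≠ x ∧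
    l = List.replicate a x ++ List.replicate b y ++ List.replicate a x

-- ---- pvRunLen facts ----
theorem pvRunLen_le (c : Char) (l : List Char) : pvRunLen c l ≤ l.length := by
  induction l with
  | nil => simp [pvRunLen]
  | cons x xs ih =>
    simp only [pvRunLen, List.length_cons]
    split <;> omega

theorem pvRunLen_take (c : Char) (l : List Char) :
    l.take (pvRunLen c l) = List.replicate (pvRunLen c l) c := by
  induction l with
  | nil => simp [pvRunLen]
  | cons x xs ih =>
    simp only [pvRunLen]
    split
    · next h => subst h; simp [List.replicate_succ, ih]
    · simp

theorem pvRunLen_drop_head (c : Char) (l : List Char) (d : Char)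
    (h : (l.drop (pvRunLen c l)).head? = some d) : d ≠ c := by
  induction l with
  | nil => simp [pvRunLen] at h
  | cons x xs ih =>
    by_cases hx : x = c
    · rw [show pvRunLen c (x :: xs) = pvRunLen c xs + 1 by simp [pvRunLen, hx],
        List.drop_succ_cons] at h
      exact ih h
    · rw [show pvRunLen c (x :: xs) = 0 by simp [pvRunLen, hx], List.drop_zero,
        List.head?_cons] at h
      injection h with h'
      subst h'
      exact hx

theorem pvRunLen_replicate_append (c : Char) (m : Nat) (t : List Char) :
    pvRunLen c (List.replicate m c ++ t) = m + pvRunLen c t := by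
  induction m with
  | zero => simp
  | succ k ih => simp [List.replicate_succ, pvRunLen, ih]; omega

theorem pvRunLen_cons_ne (c d : Char) (hd : d ≠ c) (t : List Char) :
    pvRunLen c (d :: t) = 0 := by
  simp [pvRunLen, hd]

-- ---- pvRleGo facts ----
def pvFlat (g : List (Char × Nat)) : List Char := g.flatMap (fun p => List.replicate p.2 p.1)

theorem pvRleGo_flat (xs : List Char) : ∀ (c : Char) (k : Nat),
    pvFlat (pvRleGo c k xs) = List.replicate k c ++ xs := by
  induction xs with
  | nil => intro c k; simp [pvRleGo, pvFlat]
  | cons x xs ih =>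
    intro c k
    simp only [pvRleGo]
    by_cases hx : x = c
    · subst hx
      rw [if_pos rfl, ih]
      rw [← List.singleton_append, ← List.append_assoc, ← List.replicate_succ']
    · rw [if_neg hx]
      simp only [pvFlat, List.flatMap_cons] at ih ⊢
      rw [ih]
      simp

theorem pvRleGo_counts_pos (xs : List Char) : ∀ (c : Char) (k : Nat), 1 ≤ k →
    ∀ p ∈ pvRleGo c k xs, 1 ≤ p.2 := by
  induction xs with
  | nil => intro c k hk p hp; simp [pvRleGo] at hp; subst hp; exact hk
  | cons x xs ih =>
    intro c k hk p hp
    simp only [pvRleGo] at hp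
    by_cases hx : x = c
    · rw [if_pos hx] at hp; exact ih c (k+1) (by omega) p hp
    · rw [if_neg hx] at hp
      rcases List.mem_cons.mp hp with h | h
      · subst h; exact hk
      · exact ih x 1 (le_refl 1) p h

theorem pvRleGo_head (xs : List Char) : ∀ (c : Char) (k : Nat),
    ∃ m, (pvRleGo c k xs).head? = some (c, m) := by
  induction xs with
  | nil => intro c k; exact ⟨k, rfl⟩
  | cons x xs ih =>
    intro c k
    simp only [pvRleGo]
    by_cases hx : x = c
    · rw [if_pos hx]; exact ih c (k+1)
    · rw [if_neg hx]; exact ⟨k, rfl⟩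

-- the second group's character differs from the first's
theorem pvRleGo_adj (xs : List Char) : ∀ (c : Char) (k : Nat) (p q : Char × Nat)
    (rest : List (Char × Nat)), pvRleGo c k xs = p :: q :: rest → q.1 ≠ p.1 := by
  induction xs with
  | nil => intro c k p q rest h; simp [pvRleGo] at h
  | cons x xs ih =>
    intro c k p q rest h
    simp only [pvRleGo] at h
    by_cases hx : x = c
    · rw [if_pos hx] at h; exact ih c (k+1) p q rest h
    · rw [if_neg hx] at h
      injection h with h1 h2
      obtain ⟨m, hm⟩ := pvRleGo_head xs x 1
      rw [h2] at hm
      simp only [List.head?_cons] at hm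
      injection hm with hm'
      rw [hm', ← h1]
      simpa using hx

-- computing pvRleGo along a replicate prefix
theorem pvRleGo_eat (c : Char) (m : Nat) : ∀ (k : Nat) (rest : List Char),
    pvRleGo c k (List.replicate m c ++ rest) = pvRleGo c (k + m) rest := by
  induction m with
  | zero => intro k rest; simp
  | succ j ih =>
    intro k rest
    rw [List.replicate_succ, List.cons_append,
      show pvRleGo c k (c :: (List.replicate j c ++ rest))
        = pvRleGo c (k + 1) (List.replicate j c ++ rest) by simp [pvRleGo],
      ih, show k + 1 + j = k + (j + 1) from by omega]

theorem pvRleGo_replicate (c : Char) (m k : Nat) :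
    pvRleGo c k (List.replicate m c) = [(c, k + m)] := by
  rw [show List.replicate m c = List.replicate m c ++ [] by simp, pvRleGo_eat]
  rfl

theorem pvRleGo_sandwich (x y : Char) (a b : Nat) (ha : 1 ≤ a) (hb : 1 ≤ b) (hxy : y ≠ x) :
    pvRleGo x 1 (List.replicate (a - 1) x ++ List.replicate b y ++ List.replicate a x)
      = [(x, a), (y, b), (x, a)] := by
  obtain ⟨b', rfl⟩ : ∃ b', b = b' + 1 := ⟨b - 1, by omega⟩
  rw [List.append_assoc, pvRleGo_eat, List.replicate_succ, List.cons_append,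
    show pvRleGo x (1 + (a - 1)) (y :: (List.replicate b' y ++ List.replicate a x))
      = (x, 1 + (a - 1)) :: pvRleGo y 1 (List.replicate b' y ++ List.replicate a x) by
        simp [pvRleGo, hxy],
    pvRleGo_eat]
  obtain ⟨a', rfl⟩ : ∃ a', a = a' + 1 := ⟨a - 1, by omega⟩
  rw [List.replicate_succ,
    show pvRleGo y (1 + b') (x :: List.replicate a' x)
      = (y, 1 + b') :: pvRleGo x 1 (List.replicate a' x) by
        simp [pvRleGo, Ne.symm hxy],
    pvRleGo_replicate]
  simp only [Nat.add_sub_cancel]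
  rw [show 1 + a' = a' + 1 from by omega, show 1 + b' = b' + 1 from by omega]

-- ---- small set/list helpers ----
theorem pvUniform_of_small (m : List Char) (hne : m ≠ [])
    (hlen : (PySem.Set.ofList m).length ≤ 1) :
    ∃ y, m = List.replicate m.length y := by
  obtain ⟨z, zs, rfl⟩ := List.exists_cons_of_ne_nil hne
  have hz : z ∈ PySem.Set.ofList (z :: zs) := by
    rw [PySem.Set.mem_ofList]; exact List.mem_cons_self
  obtain ⟨w, ws, hS⟩ := List.exists_cons_of_ne_nil (List.ne_nil_of_mem hz)
  have hws : ws = [] := by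
    have h1 := hlen
    rw [hS] at h1; simp at h1; exact h1
  refine ⟨w, ?_⟩
  rw [List.eq_replicate_iff]
  refine ⟨rfl, ?_⟩
  intro x hx
  have hxS : x ∈ PySem.Set.ofList (z :: zs) := (PySem.Set.mem_ofList _ _).mpr hx
  rw [hS, hws] at hxS
  simpa using hxS

theorem pvSet_replicate (y : Char) (b : Nat) (hb : 1 ≤ b) :
    PySem.Set.ofList (List.replicate b y) = [y] := by
  induction b with
  | zero => omega
  | succ k ih =>
    rw [List.replicate_succ, PySem.Set.ofList_cons]
    cases k with
    | zero => rfl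
    | succ j =>
      rw [ih (by omega)]
      simp [PySem.Set.discard]

theorem pvHead?_take {α : Type} (t : List α) (k : Nat) (hk : 1 ≤ k) :
    (t.take k).head? = t.head? := by
  cases t with
  | nil => simp
  | cons x xs => cases k with
    | zero => omega
    | succ j => simp

-- ---- characterisation of B ----
theorem pvB_iff (s : String) : is_icecream_sandwich_alt s = true ↔ pvSandwich s.toList := by
  unfold is_icecream_sandwich_alt
  cases hl : s.toList with
  | nil =>
    constructor
    · intro h; cases h
    · rintro ⟨x, y, a, b, ha, hb, hxy, heq⟩
      exfalso
      have hlen := congrArg List.length heq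
      simp at hlen; omega
  | cons c cs =>
    have hred : (match (c :: cs : List Char) with
        | [] => false
        | c :: cs => pvCheck (pvRleGo c 1 cs)) = pvCheck (pvRleGo c 1 cs) := rfl
    rw [hred]
    constructor
    · intro h
      cases hg : pvRleGo c 1 cs with
      | nil => rw [hg] at h; cases h
      | cons p1 r1 => cases r1 with
        | nil => rw [hg] at h; obtain ⟨x1,i⟩ := p1; cases h
        | cons p2 r2 => cases r2 with
          | nil => rw [hg] at h; obtain ⟨x1,i⟩ := p1; obtain ⟨x2,m⟩ := p2; cases h
          | cons p3 r3 => cases r3 with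
            | cons p4 r4 =>
              rw [hg] at h
              obtain ⟨x1,i⟩ := p1; obtain ⟨x2,m⟩ := p2; obtain ⟨x3,j⟩ := p3
              cases h
            | nil =>
              obtain ⟨x1,i⟩ := p1; obtain ⟨x2,m⟩ := p2; obtain ⟨x3,j⟩ := p3
              rw [hg] at h
              simp only [pvCheck, Bool.and_eq_true, beq_iff_eq] at h
              obtain ⟨hx, hij⟩ := h
              subst hx; subst hij
              -- flatten to recover the decomposition
              have hflat := pvRleGo_flat cs c 1
              rw [hg] at hflat
              simp only [pvFlat, List.flatMap_cons, List.flatMap_nil, List.append_nil,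
                List.replicate_one, List.singleton_append] at hflat
              have hl' : c :: cs = List.replicate i x1 ++ List.replicate m x2 ++ List.replicate i x1 := by
                rw [← hflat]; simp [List.append_assoc]
              have hpos := pvRleGo_counts_pos cs c 1 (le_refl 1)
              rw [hg] at hpos
              have hi : 1 ≤ i := hpos (x1, i) (by simp)
              have hm : 1 ≤ m := hpos (x2, m) (by simp)
              have hne : x2 ≠ x1 := pvRleGo_adj cs c 1 (x1, i) (x2, m) [(x1, i)] hg
              exact ⟨x1, x2, i, m, hi, hm, hne, hl'⟩
    · rintro ⟨x, y, a, b, ha, hb, hxy, heq⟩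
      have hax : c = x ∧ cs = List.replicate (a - 1) x ++ List.replicate b y ++ List.replicate a x := by
        obtain ⟨a', rfl⟩ : ∃ a', a = a' + 1 := ⟨a - 1, by omega⟩
        rw [List.replicate_succ] at heq
        simp only [List.cons_append] at heq
        injection heq with h1 h2
        exact ⟨h1, by rw [h2]; simp [List.replicate_succ]⟩
      obtain ⟨hcx, hcs⟩ := hax
      subst hcx
      rw [hcs, pvRleGo_sandwich c y a b ha hb hxy]
      simp [pvCheck]

-- ---- characterisation of A ----
theorem pvA_unfold (t : String) : is_icecream_sandwich t
    = (if t.toList.length < 3 then false else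
        match PySem.List.pyGet? t.toList 0, PySem.List.pyGet? t.toList (-1) with
        | some lc, some rc => pvAfterHeads t.toList t.toList.length lc rc
        | _, _ => false) := rfl

theorem pvA_iff (s : String) : is_icecream_sandwich s = true ↔ pvSandwich s.toList := by
  rw [pvA_unfold]
  set l := s.toList with hl
  set n := l.length with hn
  clear_value l
  clear_value n
  constructor
  · intro h
    by_cases h3 : n < 3
    · rw [if_pos h3] at h; cases h
    rw [if_neg h3] at h
    have hlne : l ≠ [] := by intro he; rw [he] at hn; simp at hn; omega
    obtain ⟨c, cs, hcons⟩ := List.exists_cons_of_ne_nil hlne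
    have hg0 : PySem.List.pyGet? l 0 = some c := by
      rw [hcons]; exact PySem.List.pyGet?_zero_cons c cs
    obtain ⟨rc, hg1⟩ : ∃ rc, PySem.List.pyGet? l (-1) = some rc := by
      rw [PySem.List.pyGet?_neg_one]
      rcases List.getLast?_isSome.mpr hlne |> Option.isSome_iff_exists.mp with ⟨rc, hrc⟩
      exact ⟨rc, hrc⟩
    rw [hg0, hg1] at h
    have hb : pvAfterHeads l n c rc = true := h
    unfold pvAfterHeads at hb
    simp only [] at hb
    by_cases hcond : pvRunLen c l ≠ pvRunLen rc l.reverse ∨ c ≠ rc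
    · rw [if_pos hcond] at hb; cases hb
    rw [if_neg hcond] at hb
    push_neg at hcond
    obtain ⟨hlen_eq, hc_eq⟩ := hcond
    subst hc_eq
    set a := pvRunLen c l with hadef
    set middle := PySem.List.slice l (some (a : Int)) (some ((n : Int) - (pvRunLen c l.reverse : Int))) with hmid
    clear_value a
    clear_value middle
    by_cases hbad : middle = [] ∨ middle = [c] ∨ 1 < (PySem.Set.ofList middle).length
    · rw [if_pos hbad] at hb; cases hb
    push_neg at hbad
    obtain ⟨hne, _, hsmall⟩ := hbad
    -- middle as drop/take
    have ha_le : a ≤ n := by rw [hadef, hn]; exact pvRunLen_le c l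
    have hmid2 : middle = (l.drop a).take (n - a - a) := by
      rw [hmid, ← hlen_eq]
      rw [show ((n : Int) - (a : Int)) = (((n - a : Nat)) : Int) from by omega,
        PySem.List.slice_natCast]
    -- left decomposition
    have hsplit : l = List.replicate a c ++ l.drop a := by
      conv_lhs => rw [← List.take_append_drop a l]
      rw [hadef, pvRunLen_take c l]
    -- right decomposition, reversed
    have hrsplit : l.reverse = List.replicate a c ++ l.reverse.drop a := by
      conv_lhs => rw [← List.take_append_drop a l.reverse]
      rw [hlen_eq, pvRunLen_take c l.reverse]
    have hrev2 : l = (l.reverse.drop a).reverse ++ List.replicate a c := by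
      have hrev := congrArg List.reverse hrsplit
      simp only [List.reverse_reverse, List.reverse_append, List.reverse_replicate] at hrev
      exact hrev
    have hback : l.drop (n - a) = List.replicate a c := by
      conv_lhs => rw [hrev2]
      rw [List.drop_left' (by simp [hn])]
    -- middle nonempty gives bounds
    have hmlen : middle.length = min (n - a - a) (n - a) := by
      rw [hmid2]; simp [hn]
    have hmpos : 1 ≤ middle.length := by
      cases Nat.eq_zero_or_pos middle.length with
      | inl h0 => exact absurd (List.eq_nil_of_length_eq_zero h0) hne
      | inr hp => exact hp
    have hmm : 1 ≤ n - a - a := by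
      rw [hmlen] at hmpos
      exact le_trans hmpos (Nat.min_le_left _ _)
    have h2a : a + a + 1 ≤ n := by omega
    -- middle is uniform
    obtain ⟨y, hy⟩ := pvUniform_of_small middle hne hsmall
    -- y ≠ c
    have hdropne : (l.drop a).head? = some y := by
      have h1 : middle.head? = some y := by
        rw [hy]
        cases hm : middle.length with
        | zero => omega
        | succ k => simp [List.replicate_succ]
      rw [hmid2] at h1
      rw [← pvHead?_take (l.drop a) (n - a - a) hmm]
      exact h1
    have hyc : y ≠ c := pvRunLen_drop_head c l y (by rw [← hadef]; exact hdropne)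
    -- assemble
    have hmidfull : l.drop a = middle ++ List.replicate a c := by
      conv_lhs => rw [← List.take_append_drop (n - a - a) (l.drop a)]
      rw [← hmid2]
      congr 1
      rw [List.drop_drop]
      rw [show a + (n - a - a) = n - a from by omega, hback]
    exact ⟨c, y, a, middle.length, by rw [hadef, hcons]; simp [pvRunLen], hmpos, hyc, by
      rw [hsplit, hmidfull, hy]
      simp [List.append_assoc]⟩
  · rintro ⟨x, y, a, b, ha, hb, hxy, heq⟩
    have hnval : n = a + b + a := by rw [hn, heq]; simp; omega
    rw [if_neg (show ¬ n < 3 from by omega)]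
    have hrev : l.reverse = List.replicate a x ++ List.replicate b y ++ List.replicate a x := by
      rw [heq]; simp [List.append_assoc]
    -- s[0] and s[-1] are both x
    have hg0 : PySem.List.pyGet? l 0 = some x := by
      obtain ⟨a', ha'⟩ : ∃ a', a = a' + 1 := ⟨a - 1, by omega⟩
      rw [heq, ha', List.replicate_succ, List.cons_append, List.cons_append]
      exact PySem.List.pyGet?_zero_cons _ _
    have hg1 : PySem.List.pyGet? l (-1) = some x := by
      rw [PySem.List.pyGet?_neg_one, ← List.head?_reverse, hrev]
      obtain ⟨a', ha'⟩ : ∃ a', a = a' + 1 := ⟨a - 1, by omega⟩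
      rw [ha', List.replicate_succ, List.cons_append, List.cons_append, List.head?_cons]
    rw [hg0, hg1]
    show pvAfterHeads l n x x = true
    unfold pvAfterHeads
    simp only []
    -- run lengths
    have hrun : ∀ m : List Char, m = List.replicate a x ++ List.replicate b y ++ List.replicate a x →
        pvRunLen x m = a := by
      intro m hm
      rw [hm, List.append_assoc, pvRunLen_replicate_append]
      obtain ⟨b', hb'⟩ : ∃ b', b = b' + 1 := ⟨b - 1, by omega⟩
      rw [hb', List.replicate_succ, List.cons_append, pvRunLen_cons_ne x y hxy]
      simp
    have hleft : pvRunLen x l = a := hrun l heq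
    have hright : pvRunLen x l.reverse = a := hrun l.reverse hrev
    rw [hleft, hright]
    rw [if_neg (by push_neg; exact ⟨rfl, rfl⟩)]
    -- the middle slice is exactly y^b
    have hmid : PySem.List.slice l (some (a : Int)) (some ((n : Int) - (a : Int)))
        = List.replicate b y := by
      rw [show ((n : Int) - (a : Int)) = (((n - a : Nat)) : Int) from by omega,
        PySem.List.slice_natCast]
      rw [heq, List.append_assoc, List.drop_left' (by simp)]
      rw [show n - a - a = b from by omega, List.take_left' (by simp)]
    rw [hmid]
    rw [if_neg ?_]
    push_neg
    refine ⟨?_, ?_, ?_⟩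
    · intro he
      have := congrArg List.length he
      simp at this; omega
    · intro he
      obtain ⟨b', hb'⟩ : ∃ b', b = b' + 1 := ⟨b - 1, by omega⟩
      rw [hb', List.replicate_succ] at he
      injection he with h1 _
      exact hxy h1
    · rw [pvSet_replicate y b hb]
      simp

-- ===== VERDICT (by name: the statement is the Claim_ definition above) =====
theorem is_icecream_sandwich_spec : Claim_equal_is_icecream_sandwich := by
  intro s _
  unfold Spec_is_icecream_sandwich
  rw [Bool.eq_iff_iff, pvA_iff, pvB_iff]
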